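-- pv_equiv track=rewrite | github.com/Onimaroo/Renforcement-de-Reseau | Network_Project/ameliorations.py | feuillesCSP
-- ===== SOURCE A (Python) =====
-- def feuillesCSP(ponts, CSP):
--     """Renvoie les dates des représentants d'une CSP qui est une feuille."""
--     feuilles = set()
--     noeuds = set()
--     for (u, v) in ponts :
--         x, y = CSP[u], CSP[v]
--         if x in feuilles :
--             feuilles.remove(x)
--             noeuds.add(x)
--         elif x not in noeuds:
--             feuilles.add(x)
--         if y in feuilles :
--             feuilles.remove(y)
--             noeuds.add(y)
--         elif y not in noeuds :
--             feuilles.add(y)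
--     return feuilles
-- ===== SOURCE B (Python) =====
-- def feuillesCSP(ponts, CSP):
--     """Renvoie les dates des representants d'une CSP qui est une feuille."""
--     counts = {}
--     for (u, v) in ponts:
--         x, y = CSP[u], CSP[v]
--         counts[x] = counts.get(x, 0) + 1
--         counts[y] = counts.get(y, 0) + 1
--     return {r for r, n in counts.items() if n == 1}
-- ===== Notes on version B (the rewrite author's own statement) =====
-- stated objective: simpler
-- what changed: A maintains two evolving sets (feuilles/noeuds) with if/elif add/remove branching per endpoint; B builds a frequency table of representatives in one counting pass and then returns the set of representatives seen exactly once via a filter pass.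
import Mathlib
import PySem

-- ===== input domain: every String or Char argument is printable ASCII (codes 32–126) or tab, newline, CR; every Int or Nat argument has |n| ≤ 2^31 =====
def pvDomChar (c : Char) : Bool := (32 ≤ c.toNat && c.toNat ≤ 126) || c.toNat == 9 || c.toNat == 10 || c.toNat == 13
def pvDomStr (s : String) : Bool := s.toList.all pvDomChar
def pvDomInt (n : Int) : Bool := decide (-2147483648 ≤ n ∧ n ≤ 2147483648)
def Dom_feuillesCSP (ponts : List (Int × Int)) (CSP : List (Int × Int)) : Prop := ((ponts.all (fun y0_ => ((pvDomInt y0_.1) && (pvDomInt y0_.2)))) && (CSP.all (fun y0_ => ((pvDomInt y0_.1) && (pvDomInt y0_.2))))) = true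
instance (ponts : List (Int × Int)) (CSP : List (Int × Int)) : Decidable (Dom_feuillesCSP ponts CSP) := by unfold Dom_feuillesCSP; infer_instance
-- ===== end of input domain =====

-- B replaces A's two evolving sets (feuilles/noeuds with if/elif add/remove branching) by a
-- count-then-filter two-pass shape: build a frequency table of representatives, then keep those
-- seen exactly once (objective: simpler).

-- ===== PORT A =====
-- one representative z processed through A's if/elif branches over the two sets (feuilles, noeuds)
def pvAstep (s : PySem.Set Int × PySem.Set Int) (z : Int) : PySem.Set Int × PySem.Set Int :=
  if PySem.Set.contains s.1 z then
    ((PySem.Set.remove? s.1 z).getD s.1, PySem.Set.add s.2 z)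
  else if PySem.Set.contains s.2 z then s
  else (PySem.Set.add s.1 z, s.2)

-- one loop iteration: x, y = CSP[u], CSP[v] (none = KeyError), then the two branch blocks
def pvAedge (d : PySem.Dict Int Int) (s : Option (PySem.Set Int × PySem.Set Int)) (p : Int × Int) :
    Option (PySem.Set Int × PySem.Set Int) :=
  s.bind fun st => (d.get? p.1).bind fun x => (d.get? p.2).map fun y => pvAstep (pvAstep st x) y

def feuillesCSP (ponts : List (Int × Int)) (CSP : List (Int × Int)) : List Int :=
  match ponts.foldl (pvAedge (PySem.Dict.mk CSP)) (some (PySem.Set.empty, PySem.Set.empty)) with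
  | some s => s.1
  | none => []   -- unreachable under Pre_ (KeyError in Python)

-- ===== PORT B =====
-- one loop iteration of B: x, y = CSP[u], CSP[v]; counts[x] += 1; counts[y] += 1
def pvBedge (d : PySem.Dict Int Int) (c : Option (PySem.Dict Int Int)) (p : Int × Int) :
    Option (PySem.Dict Int Int) :=
  c.bind fun cc => (d.get? p.1).bind fun x => (d.get? p.2).map fun y =>
    (cc.modify x 0 (· + 1)).modify y 0 (· + 1)

def feuillesCSP_alt (ponts : List (Int × Int)) (CSP : List (Int × Int)) : List Int :=
  match ponts.foldl (pvBedge (PySem.Dict.mk CSP)) (some PySem.Dict.empty) with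
  | some c => PySem.Set.ofList ((c.items.filter (fun kn => kn.2 == 1)).map (·.1))
  | none => []   -- unreachable under Pre_ (KeyError in Python)

-- ===== PRECONDITION & SPEC =====
-- Pre_ excludes exactly the inputs where CSP[u]/CSP[v] raises KeyError (an endpoint of a bridge
-- that is not a key of CSP); both A and B raise there.
def Pre_feuillesCSP (ponts : List (Int × Int)) (CSP : List (Int × Int)) : Prop :=
  ∀ p ∈ ponts, p.1 ∈ CSP.map Prod.fst ∧ p.2 ∈ CSP.map Prod.fst
instance (ponts : List (Int × Int)) (CSP : List (Int × Int)) : Decidable (Pre_feuillesCSP ponts CSP) := by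
  unfold Pre_feuillesCSP; infer_instance

def pvWitness_feuillesCSP : (List (Int × Int)) × (List (Int × Int)) :=
  ([(0, 1), (1, 2)], [(0, 5), (1, 7), (2, 5)])

def Spec_feuillesCSP (ponts : List (Int × Int)) (CSP : List (Int × Int)) (out : List Int) : Prop := out = feuillesCSP_alt ponts CSP
instance (ponts : List (Int × Int)) (CSP : List (Int × Int)) (out : List Int) : Decidable (Spec_feuillesCSP ponts CSP out) := by unfold Spec_feuillesCSP; infer_instance

-- ===== CLAIM (what is proved, stated in full; the proofs are below) =====
def Claim_equal_feuillesCSP : Prop := ∀ (ponts : List (Int × Int)) (CSP : List (Int × Int)), Dom_feuillesCSP ponts CSP → Pre_feuillesCSP ponts CSP → Spec_feuillesCSP ponts CSP (feuillesCSP ponts CSP)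

-- ===== LEMMAS AND PROOFS =====

-- the flattened stream of representatives, one edge contributing [CSP[u], CSP[v]]
def pvReps (d : PySem.Dict Int Int) (ponts : List (Int × Int)) : List Int :=
  ponts.flatMap fun p => [d.getD p.1 0, d.getD p.2 0]

theorem pvAfold (d : PySem.Dict Int Int) (ponts : List (Int × Int))
    (h : ∀ p ∈ ponts, d.contains p.1 = true ∧ d.contains p.2 = true) (s0 : PySem.Set Int × PySem.Set Int) :
    ponts.foldl (pvAedge d) (some s0) = some ((pvReps d ponts).foldl pvAstep s0) := by
  induction ponts generalizing s0 with
  | nil => simp [pvReps]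
  | cons p t ih =>
    obtain ⟨h1, h2⟩ := h p (by simp)
    obtain ⟨x, hx⟩ : ∃ x, d.get? p.1 = some x := by
      rw [PySem.Dict.contains_eq_isSome_get?] at h1; exact Option.isSome_iff_exists.mp h1
    obtain ⟨y, hy⟩ : ∃ y, d.get? p.2 = some y := by
      rw [PySem.Dict.contains_eq_isSome_get?] at h2; exact Option.isSome_iff_exists.mp h2
    have gx : d.getD p.1 0 = x := PySem.Dict.getD_of_get?_eq_some d 0 hx
    have gy : d.getD p.2 0 = y := PySem.Dict.getD_of_get?_eq_some d 0 hy
    simp only [List.foldl_cons, pvAedge, hx, hy, Option.bind_some, Option.map_some, pvReps,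
      List.flatMap_cons, gx, gy]
    rw [ih (fun q hq => h q (by simp [hq]))]
    rfl

theorem pvBfold (d : PySem.Dict Int Int) (ponts : List (Int × Int))
    (h : ∀ p ∈ ponts, d.contains p.1 = true ∧ d.contains p.2 = true) (c0 : PySem.Dict Int Int) :
    ponts.foldl (pvBedge d) (some c0) = some ((pvReps d ponts).foldl (fun c z => c.modify z 0 (· + 1)) c0) := by
  induction ponts generalizing c0 with
  | nil => simp [pvReps]
  | cons p t ih =>
    obtain ⟨h1, h2⟩ := h p (by simp)
    obtain ⟨x, hx⟩ : ∃ x, d.get? p.1 = some x := by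
      rw [PySem.Dict.contains_eq_isSome_get?] at h1; exact Option.isSome_iff_exists.mp h1
    obtain ⟨y, hy⟩ : ∃ y, d.get? p.2 = some y := by
      rw [PySem.Dict.contains_eq_isSome_get?] at h2; exact Option.isSome_iff_exists.mp h2
    have gx : d.getD p.1 0 = x := PySem.Dict.getD_of_get?_eq_some d 0 hx
    have gy : d.getD p.2 0 = y := PySem.Dict.getD_of_get?_eq_some d 0 hy
    simp only [List.foldl_cons, pvBedge, hx, hy, Option.bind_some, Option.map_some, pvReps,
      List.flatMap_cons, gx, gy]
    rw [ih (fun q hq => h q (by simp [hq]))]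
    rfl

-- invariant of A's loop over the flattened stream: feuilles is exactly the count-1 elements in
-- first-occurrence order, noeuds holds the elements with count ≥ 2
theorem pvAinv (zs : List Int) :
    (zs.foldl pvAstep (PySem.Set.empty, PySem.Set.empty)).1
      = (PySem.Set.ofList zs).filter (fun z => zs.count z == 1)
    ∧ ∀ z : Int, (z ∈ (zs.foldl pvAstep (PySem.Set.empty, PySem.Set.empty)).2 ↔ 2 ≤ zs.count z) := by
  induction zs using List.reverseRecOn with
  | nil => simp [PySem.Set.ofList_nil, PySem.Set.empty]
  | append_singleton zs a ih =>
    obtain ⟨ihF, ihN⟩ := ih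
    rw [List.foldl_append]
    set st := zs.foldl pvAstep (PySem.Set.empty, PySem.Set.empty) with hst
    have hmemF : ∀ z : Int, z ∈ st.1 ↔ zs.count z = 1 := by
      intro z
      rw [ihF]
      simp only [List.mem_filter, PySem.Set.mem_ofList, beq_iff_eq]
      constructor
      · rintro ⟨-, h⟩; exact h
      · intro h; exact ⟨List.count_pos_iff.mp (by omega), h⟩
    have hcnt : ∀ z : Int, (zs ++ [a]).count z = zs.count z + if a = z then 1 else 0 := by
      intro z
      rw [List.count_append]
      by_cases hz : a = z
      · subst hz; simp
      · simp [hz]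
    rw [PySem.Set.ofList_append_singleton]
    simp only [List.foldl_cons, List.foldl_nil]
    by_cases hc1 : zs.count a = 1
    · -- second occurrence: move a from feuilles to noeuds
      have haF : a ∈ st.1 := (hmemF a).mpr hc1
      have hcontains : PySem.Set.contains st.1 a = true := (PySem.Set.contains_iff _ _).mpr haF
      have hainz : a ∈ PySem.Set.ofList zs := by
        rw [PySem.Set.mem_ofList]; exact List.count_pos_iff.mp (by omega)
      have hadd : PySem.Set.add (PySem.Set.ofList zs) a = PySem.Set.ofList zs := by
        rw [PySem.Set.add, if_pos ((PySem.Set.contains_iff _ _).mpr hainz)]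
      have hstep : pvAstep st a = (st.1.discard a, st.2.add a) := by
        rw [pvAstep, if_pos hcontains, PySem.Set.remove?_of_mem haF]; rfl
      rw [hstep, hadd]
      constructor
      · show st.1.discard a = _
        rw [PySem.Set.discard, ihF, List.filter_filter]
        apply List.filter_congr
        intro z hz
        rw [hcnt z]
        by_cases hza : a = z
        · subst hza; simp [hc1]
        · simp [hza, Ne.symm hza]
      · intro z
        show z ∈ st.2.add a ↔ _
        rw [PySem.Set.mem_add, hcnt z]
        by_cases hz : a = z
        · subst hz; simp [hc1]
        · simp [Ne.symm hz, hz, ihN z]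
    · by_cases hc0 : zs.count a = 0
      · -- first occurrence: add a to feuilles
        have haF : a ∉ st.1 := fun h => hc1 ((hmemF a).mp h)
        have haN : a ∉ st.2 := fun h => by have := (ihN a).mp h; omega
        have hanz : a ∉ PySem.Set.ofList zs := by
          rw [PySem.Set.mem_ofList]
          intro h; exact absurd (List.count_pos_iff.mpr h) (by omega)
        have hstep : pvAstep st a = (st.1 ++ [a], st.2) := by
          rw [pvAstep, if_neg (by simpa using haF), if_neg (by simpa using haN),
            PySem.Set.add, if_neg (by simpa using haF)]
        have hadd : PySem.Set.add (PySem.Set.ofList zs) a = PySem.Set.ofList zs ++ [a] := by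
          rw [PySem.Set.add, if_neg (by simpa using hanz)]
        rw [hstep, hadd]
        constructor
        · show st.1 ++ [a] = _
          rw [List.filter_append, ihF]
          congr 1
          · apply List.filter_congr
            intro z hz
            have hza : a ≠ z := fun h => hanz (by rw [h]; exact hz)
            rw [hcnt z, if_neg hza, Nat.add_zero]
          · simp [hc0]
        · intro z
          show z ∈ st.2 ↔ _
          rw [hcnt z, ihN z]
          by_cases hz : a = z
          · subst hz; rw [if_pos rfl]; omega
          · rw [if_neg hz]; omega
      · -- count ≥ 2: a already in noeuds, nothing changes
        have hc2 : 2 ≤ zs.count a := by omega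
        have haF : a ∉ st.1 := fun h => hc1 ((hmemF a).mp h)
        have h2 : PySem.Set.contains st.2 a = true :=
          (PySem.Set.contains_iff _ _).mpr ((ihN a).mpr hc2)
        have hainz : a ∈ PySem.Set.ofList zs := by
          rw [PySem.Set.mem_ofList]; exact List.count_pos_iff.mp (by omega)
        have hadd : PySem.Set.add (PySem.Set.ofList zs) a = PySem.Set.ofList zs := by
          rw [PySem.Set.add, if_pos ((PySem.Set.contains_iff _ _).mpr hainz)]
        have hstep : pvAstep st a = st := by
          rw [pvAstep, if_neg (by simpa using haF), if_pos h2]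
        rw [hstep, hadd]
        constructor
        · rw [ihF]
          apply List.filter_congr
          intro z hz
          rw [hcnt z]
          by_cases hza : a = z
          · subst hza
            rw [if_pos rfl]
            have e1 : (zs.count a + 1 == 1) = false := by simp; omega
            have e2 : (zs.count a == 1) = false := by simp [hc1]
            rw [e1, e2]
          · rw [if_neg hza, Nat.add_zero]
        · intro z
          rw [hcnt z, ihN z]
          by_cases hz : a = z
          · subst hz; rw [if_pos rfl]; omega
          · rw [if_neg hz]; omega

theorem feuillesCSP_spec' (ponts : List (Int × Int)) (CSP : List (Int × Int))
    (hpre : Pre_feuillesCSP ponts CSP) :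
    feuillesCSP ponts CSP = feuillesCSP_alt ponts CSP := by
  have hc : ∀ p ∈ ponts, (PySem.Dict.mk CSP).contains p.1 = true ∧ (PySem.Dict.mk CSP).contains p.2 = true := by
    intro p hp
    obtain ⟨h1, h2⟩ := hpre p hp
    refine ⟨?_, ?_⟩
    · rw [PySem.Dict.contains_iff_mem_keys]; simpa [PySem.Dict.keys_mk] using h1
    · rw [PySem.Dict.contains_iff_mem_keys]; simpa [PySem.Dict.keys_mk] using h2
  rw [feuillesCSP, feuillesCSP_alt,
    pvAfold (PySem.Dict.mk CSP) ponts hc (PySem.Set.empty, PySem.Set.empty),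
    pvBfold (PySem.Dict.mk CSP) ponts hc PySem.Dict.empty]
  simp only []
  rw [(pvAinv (pvReps (PySem.Dict.mk CSP) ponts)).1, ← PySem.Dict.counter_eq_foldl,
    PySem.Dict.items_counter, List.filter_map, List.map_map]
  have hpred : ∀ k : Int,
      (((fun kn : Int × Int => kn.2 == 1) ∘ fun k => (k, (((pvReps (PySem.Dict.mk CSP) ponts).count k : Nat) : Int))) k)
        = ((pvReps (PySem.Dict.mk CSP) ponts).count k == 1) := by
    intro k
    simp [Function.comp]
  rw [List.filter_congr (fun k _ => hpred k)]
  have : ((·.1) ∘ fun k : Int => (k, (((pvReps (PySem.Dict.mk CSP) ponts).count k : Nat) : Int))) = id := by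
    funext k; rfl
  rw [this, List.map_id]
  rw [PySem.Set.ofList_eq_self_of_nodup _
    ((PySem.Set.nodup_ofList (pvReps (PySem.Dict.mk CSP) ponts)).filter _)]

-- ===== VERDICT (by name: the statement is the Claim_ definition above) =====
theorem feuillesCSP_spec : Claim_equal_feuillesCSP := by
  intro ponts CSP _ hpre
  exact feuillesCSP_spec' ponts CSP hpre
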